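-- pv_equiv track=rewrite | github.com/shaolinpat/hl7_fhir_tool | tools/unique_owners.py | lines_by_owner
-- ===== SOURCE A (Python) =====
-- from collections import defaultdict
--
-- def lines_by_owner(line_to_tests: dict) -> dict[str, list[int]]:
--     """Inverse index: owner -> sorted list of unique lines they alone cover."""
--     owners = defaultdict(list)
--     for ln, tests in line_to_tests.items():
--         if len(tests) == 1:
--             (ctx,) = tuple(tests)
--             owners[ctx].append(ln)
--     for k in list(owners.keys()):
--         owners[k].sort()
--     return owners
-- ===== SOURCE B (Python) =====
-- from collections import defaultdict
--
--
-- def lines_by_owner(line_to_tests: dict) -> dict[str, list[int]]: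
--     """Inverse index: owner -> sorted list of unique lines they alone cover."""
--     pairs = [(tests[0], ln) for ln, tests in line_to_tests.items() if len(tests) == 1]
--     owners = defaultdict(list)
--     for owner in dict.fromkeys(owner for owner, _ in pairs):
--         owners[owner] = []
--     for owner, ln in sorted(pairs, key=lambda p: p[1]):
--         owners[owner].append(ln)
--     return owners
-- ===== Notes on version B (the rewrite author's own statement) =====
-- stated objective: alternative
-- what changed: B collects all singleton (owner, line) pairs in one pass, seeds the owners in first-appearance order, then performs ONE global sort of the pairs by line and distributes them in a single grouping pass, replacing A's filter-into-buckets-then-sort-each-bucket loop.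
import Mathlib
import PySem

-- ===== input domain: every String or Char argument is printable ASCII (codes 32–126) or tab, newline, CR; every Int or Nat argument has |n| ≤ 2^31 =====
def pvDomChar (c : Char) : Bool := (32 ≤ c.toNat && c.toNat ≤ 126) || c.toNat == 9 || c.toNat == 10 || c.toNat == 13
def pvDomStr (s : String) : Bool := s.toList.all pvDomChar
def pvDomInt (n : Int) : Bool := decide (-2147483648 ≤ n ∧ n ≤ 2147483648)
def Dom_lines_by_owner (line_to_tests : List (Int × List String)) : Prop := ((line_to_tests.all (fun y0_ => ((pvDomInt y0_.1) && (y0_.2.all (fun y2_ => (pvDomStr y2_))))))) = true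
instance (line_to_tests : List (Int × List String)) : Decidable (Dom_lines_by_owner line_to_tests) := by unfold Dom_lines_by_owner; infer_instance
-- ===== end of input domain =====

-- B replaces A's "bucket per owner, then sort each bucket" with "one global sort of the
-- singleton (owner, line) pairs by line, then a single distributing pass" (alternative
-- decomposition, same asymptotic cost). Equivalence of the return value is proved below.

-- ===== PORT A =====
def lines_by_owner (line_to_tests : List (Int × List String)) : List (String × List Int) :=
  -- owners = defaultdict(list); for ln, tests in items: if len(tests)==1: owners[tests[0]].append(ln)
  let owners : PySem.Dict String (List Int) :=
    line_to_tests.foldl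
      (fun d p =>
        if p.2.length == 1 then d.modify (p.2.headD "") [] (fun v => v ++ [p.1]) else d)
      PySem.Dict.empty
  -- for k in list(owners.keys()): owners[k].sort()
  let owners :=
    owners.keys.foldl
      (fun d k => d.insert k (PySem.List.sorted (d.getD k []) (fun x => x) false)) owners
  owners.items

-- ===== PORT B =====
def lines_by_owner_alt (line_to_tests : List (Int × List String)) : List (String × List Int) :=
  -- pairs = [(tests[0], ln) for ln, tests in items if len(tests) == 1]
  let pairs : List (String × Int) :=
    (line_to_tests.filter (fun p => p.2.length == 1)).map (fun p => (p.2.headD "", p.1))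
  -- owners = defaultdict(list); for owner in dict.fromkeys(owner for owner, _ in pairs): owners[owner] = []
  let owners : PySem.Dict String (List Int) :=
    (PySem.List.dedup (pairs.map (·.1))).foldl
      (fun d o => d.insert o ([] : List Int)) PySem.Dict.empty
  -- for owner, ln in sorted(pairs, key=lambda p: p[1]): owners[owner].append(ln)
  let owners :=
    (PySem.List.sorted pairs (fun p => p.2) false).foldl
      (fun d p => d.modify p.1 [] (fun v => v ++ [p.2])) owners
  owners.items

-- ===== PRECONDITION & SPEC =====
def Spec_lines_by_owner (line_to_tests : List (Int × List String)) (out : List (String × List Int)) : Prop := out = lines_by_owner_alt line_to_tests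
instance (line_to_tests : List (Int × List String)) (out : List (String × List Int)) : Decidable (Spec_lines_by_owner line_to_tests out) := by unfold Spec_lines_by_owner; infer_instance

-- ===== CLAIM (what is proved, stated in full; the proofs are below) =====
def Claim_equal_lines_by_owner : Prop := ∀ (line_to_tests : List (Int × List String)), Dom_lines_by_owner line_to_tests → Spec_lines_by_owner line_to_tests (lines_by_owner line_to_tests)

-- ===== LEMMAS AND PROOFS =====

-- the singleton (owner, line) pairs both programs are built from
def pvPairs (line_to_tests : List (Int × List String)) : List (String × Int) :=
  (line_to_tests.filter (fun p => p.2.length == 1)).map (fun p => (p.2.headD "", p.1))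

-- A's second loop: re-inserting each (Nodup) key with a function of its current value
theorem pv_getD_foldl_insert_fn (f : List Int → List Int) (ks : List String)
    (hn : ks.Nodup) (d : PySem.Dict String (List Int)) (c : String) :
    (ks.foldl (fun d k => d.insert k (f (d.getD k []))) d).getD c []
      = if c ∈ ks then f (d.getD c []) else d.getD c [] := by
  induction ks generalizing d with
  | nil => simp
  | cons k ks ih =>
    rcases List.nodup_cons.mp hn with ⟨hk, hks⟩
    simp only [List.foldl_cons]
    rw [ih hks]
    simp only [PySem.Dict.getD_insert, List.mem_cons]
    by_cases hck : c = k
    · subst hck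
      simp [hk]
    · simp [hck]

-- set.update with already-present elements is the identity
theorem pv_set_update_of_forall_mem (xs s : List String) (h : ∀ x ∈ xs, x ∈ s) :
    PySem.Set.update s xs = s := by
  induction xs generalizing s with
  | nil => rfl
  | cons x xs ih =>
    have hx : x ∈ s := h x (List.mem_cons_self ..)
    show PySem.Set.update (PySem.Set.add s x) xs = s
    rw [PySem.Set.add_of_mem hx]
    exact ih s (fun y hy => h y (List.mem_cons_of_mem _ hy))

-- the per-owner buckets agree: sorting A's bucket = filtering the globally sorted pairs
theorem pv_bucket_eq (qs : List (String × Int)) (o : String) :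
    PySem.List.sorted ((qs.filter (fun q => q.1 == o)).map (·.2)) (fun x => x) false
      = ((PySem.List.sorted qs (fun p => p.2) false).filter (fun q => q.1 == o)).map (·.2) := by
  apply PySem.List.sorted_id_eq_of_perm_of_pairwise
  · exact (((PySem.List.sorted_perm qs (fun p => p.2) false).filter _).map _)
  · have h1 : (PySem.List.sorted qs (fun p => p.2) false).Pairwise (fun a b => a.2 ≤ b.2) :=
      PySem.List.sorted_pairwise qs (fun p => p.2)
    exact (List.pairwise_map).mpr (h1.filter _)

-- A's result, characterised over the pairs list
theorem pv_A_eq (l : List (Int × List String)) :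
    lines_by_owner l
      = (PySem.Set.ofList ((pvPairs l).map (·.1))).map
          (fun o => (o, PySem.List.sorted (((pvPairs l).filter (fun q => q.1 == o)).map (·.2))
                          (fun x => x) false)) := by
  unfold lines_by_owner
  have hfold : l.foldl
      (fun d p => if p.2.length == 1 then d.modify (p.2.headD "") [] (fun v => v ++ [p.1]) else d)
      PySem.Dict.empty
      = (pvPairs l).foldl (fun d q => d.modify q.1 [] (fun v => v ++ [q.2])) PySem.Dict.empty := by
    rw [PySem.List.foldl_if_eq_foldl_filter, pvPairs, List.foldl_map]
  rw [hfold]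
  set d1 := (pvPairs l).foldl (fun d q => d.modify q.1 [] (fun v => v ++ [q.2])) PySem.Dict.empty with hd1
  have hkeys : d1.keys = PySem.Set.ofList ((pvPairs l).map (·.1)) := by
    rw [hd1, PySem.Dict.keys_foldl_modify_key]
    rfl
  have hnodup : d1.keys.Nodup := by
    rw [hkeys]; exact PySem.Set.nodup_ofList _
  have hgetD : ∀ c, d1.getD c [] = ((pvPairs l).filter (fun q => q.1 == c)).map (·.2) := by
    intro c
    rw [hd1, PySem.Dict.getD_foldl_modify_append]
    simp
  set d2 := d1.keys.foldl
      (fun d k => d.insert k (PySem.List.sorted (d.getD k []) (fun x => x) false)) d1 with hd2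
  have hkeys2 : d2.keys = d1.keys := by
    rw [hd2, PySem.Dict.keys_foldl_insert]
    exact pv_set_update_of_forall_mem _ _ (fun x hx => hx)
  have hnodup2 : d2.keys.Nodup := hkeys2 ▸ hnodup
  rw [PySem.Dict.items_eq_map_keys d2 hnodup2 [], hkeys2, hkeys]
  apply List.map_congr_left
  intro o ho
  have hmem : o ∈ d1.keys := by rw [hkeys]; exact ho
  have := pv_getD_foldl_insert_fn (fun v => PySem.List.sorted v (fun x => x) false) d1.keys hnodup d1 o
  rw [hd2, this, if_pos hmem, hgetD]

-- B's result, characterised over the pairs list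
theorem pv_B_eq (l : List (Int × List String)) :
    lines_by_owner_alt l
      = (PySem.Set.ofList ((pvPairs l).map (·.1))).map
          (fun o => (o, ((PySem.List.sorted (pvPairs l) (fun p => p.2) false).filter
                          (fun q => q.1 == o)).map (·.2))) := by
  unfold lines_by_owner_alt
  dsimp only
  have hpairs : (l.filter (fun p => p.2.length == 1)).map (fun p => (p.2.headD "", p.1)) = pvPairs l := rfl
  rw [hpairs]
  set ko := PySem.Set.ofList ((pvPairs l).map (·.1)) with hko
  have hdedup : PySem.List.dedup ((pvPairs l).map (·.1)) = ko := by
    rw [hko]; simp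
  rw [hdedup]
  set d0 := ko.foldl (fun d o => d.insert o ([] : List Int)) PySem.Dict.empty with hd0
  have hkonodup : ko.Nodup := PySem.Set.nodup_ofList _
  have hitems0 : d0.items = ko.map (fun o => (o, ([] : List Int))) := by
    rw [hd0]
    have := PySem.Dict.items_foldl_insert_fresh (l := ko) (k := fun o => o)
      (v := fun _ => ([] : List Int)) (d := PySem.Dict.empty)
      (by intro a _; simp) (by simpa using hkonodup)
    simpa using this
  have hkeys0 : d0.keys = ko := by
    show d0.items.map (·.1) = ko
    have hcomp : (fun x : String × List Int => x.1) ∘ (fun o : String => (o, ([] : List Int))) = id := rfl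
    rw [hitems0, List.map_map, hcomp, List.map_id]
  have hgetD0 : ∀ c, d0.getD c [] = [] := by
    intro c
    by_cases hc : c ∈ ko
    · exact PySem.Dict.getD_of_mem_items d0 (by rw [hitems0]; exact List.mem_map_of_mem hc)
        (by rw [hkeys0]; exact hkonodup) []
    · refine PySem.Dict.getD_of_not_contains d0 [] ?_
      rw [← Bool.not_eq_true]
      intro hcon
      exact hc (hkeys0 ▸ (PySem.Dict.contains_iff_mem_keys d0 c).mp hcon)
  set sp := PySem.List.sorted (pvPairs l) (fun p => p.2) false with hsp
  set d1 := sp.foldl (fun d p => d.modify p.1 [] (fun v => v ++ [p.2])) d0 with hd1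
  have hkeys1 : d1.keys = ko := by
    rw [hd1, PySem.Dict.keys_foldl_modify_key, hkeys0]
    apply pv_set_update_of_forall_mem
    intro x hx
    rcases List.mem_map.mp hx with ⟨q, hq, rfl⟩
    have hq' : q ∈ pvPairs l := (PySem.List.mem_sorted _ _ _ _).mp hq
    rw [hko]
    exact (PySem.Set.mem_ofList _ _).mpr (List.mem_map_of_mem hq')
  have hnodup1 : d1.keys.Nodup := hkeys1 ▸ hkonodup
  have hgetD1 : ∀ c, d1.getD c [] = (sp.filter (fun q => q.1 == c)).map (·.2) := by
    intro c
    rw [hd1, PySem.Dict.getD_foldl_modify_append, hgetD0]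
    simp
  rw [PySem.Dict.items_eq_map_keys d1 hnodup1 [], hkeys1]
  apply List.map_congr_left
  intro o _
  rw [hgetD1]

-- ===== VERDICT (by name: the statement is the Claim_ definition above) =====
theorem lines_by_owner_spec : Claim_equal_lines_by_owner := by
  intro l _
  show lines_by_owner l = lines_by_owner_alt l
  rw [pv_A_eq, pv_B_eq]
  apply List.map_congr_left
  intro o _
  exact congrArg (fun v => (o, v)) (pv_bucket_eq (pvPairs l) o)
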